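-- pv_equiv track=rewrite | github.com/pypi-data/pypi-mirror-400 | packages/somaya/somaya-1.0.5.tar.gz/somaya-1.0.5/cognitive/algorithms/semantic_similarity.py | _token_similar
-- ===== SOURCE A (Python) =====
-- def _token_similar(token_a: str, token_b: str) -> bool:
--     """Check if two tokens are similar (substring or edit distance)."""
--     # Substring check
--     if token_a in token_b or token_b in token_a:
--         return True
--
--     # Prefix check
--     min_len = min(len(token_a), len(token_b))
--     prefix_len = 0
--     for i in range(min_len):
--         if token_a[i] == token_b[i]:
--             prefix_len += 1
--         else:
--             break
--
--     if prefix_len >= 3: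
--         return True
--
--     return False
-- ===== SOURCE B (Python) =====
-- def _token_similar(token_a: str, token_b: str) -> bool:
--     """Substring, or a common prefix of length >= 3, by direct slice comparison."""
--     return (token_a in token_b or token_b in token_a
--             or (len(token_a) >= 3 and len(token_b) >= 3 and token_a[:3] == token_b[:3]))
-- ===== Notes on version B (the rewrite author's own statement) =====
-- stated objective: simpler
-- what changed: Replaced the incremental prefix-counting loop and its >= 3 threshold with a single closed-form expression comparing the first three characters by slice, guarded by explicit length checks.
import Mathlib
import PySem

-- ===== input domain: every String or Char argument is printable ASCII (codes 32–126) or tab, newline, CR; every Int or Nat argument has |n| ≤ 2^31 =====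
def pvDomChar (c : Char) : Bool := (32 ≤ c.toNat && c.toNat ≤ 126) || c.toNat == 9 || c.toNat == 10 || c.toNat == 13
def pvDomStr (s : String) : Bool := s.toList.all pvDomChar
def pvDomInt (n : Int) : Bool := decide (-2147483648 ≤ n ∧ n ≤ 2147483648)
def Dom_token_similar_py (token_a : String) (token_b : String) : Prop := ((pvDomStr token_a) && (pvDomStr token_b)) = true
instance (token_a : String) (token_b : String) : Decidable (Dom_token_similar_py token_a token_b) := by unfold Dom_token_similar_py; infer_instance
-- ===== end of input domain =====

-- B replaces A's incremental prefix-counting loop with a closed-form 3-character slice comparison (objective: simpler).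


-- ===== PORT A =====
-- A's loop 'for i in range(min_len): if a[i] == b[i]: prefix_len += 1 else: break'
-- counts matching leading characters and stops at the first mismatch: structural
-- recursion over the two character lists (the min_len bound is the shorter list running out).
def pvPrefCount : List Char → List Char → Nat
  | a :: as, b :: bs => if a == b then pvPrefCount as bs + 1 else 0
  | _, _ => 0

def token_similar_py (token_a : String) (token_b : String) : Bool :=
  if PySem.Str.isIn token_a token_b || PySem.Str.isIn token_b token_a then true
  else if 3 ≤ pvPrefCount token_a.toList token_b.toList then true
  else false

-- ===== PORT B =====
def token_similar_py_alt (token_a : String) (token_b : String) : Bool :=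
  PySem.Str.isIn token_a token_b || PySem.Str.isIn token_b token_a ||
    (decide (3 ≤ (PySem.Str.len token_a)) && decide (3 ≤ (PySem.Str.len token_b)) &&
      (PySem.List.slice token_a.toList none (some 3) == PySem.List.slice token_b.toList none (some 3)))

-- ===== PRECONDITION & SPEC =====
def Spec_token_similar_py (token_a : String) (token_b : String) (out : Bool) : Prop := out = token_similar_py_alt token_a token_b
instance (token_a : String) (token_b : String) (out : Bool) : Decidable (Spec_token_similar_py token_a token_b out) := by unfold Spec_token_similar_py; infer_instance

-- ===== CLAIM (what is proved, stated in full; the proofs are below) =====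
def Claim_equal_token_similar_py : Prop := ∀ (token_a : String) (token_b : String), Dom_token_similar_py token_a token_b → Spec_token_similar_py token_a token_b (token_similar_py token_a token_b)

-- ===== LEMMAS AND PROOFS =====
lemma pvPrefCount_ge_iff (n : ℕ) : ∀ (as bs : List Char),
    (n ≤ pvPrefCount as bs) ↔ (n ≤ as.length ∧ n ≤ bs.length ∧ as.take n = bs.take n) := by
  induction n with
  | zero => intro as bs; simp
  | succ n ih =>
    intro as bs
    cases as with
    | nil => simp [pvPrefCount]
    | cons a as =>
      cases bs with
      | nil => simp [pvPrefCount]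
      | cons b bs =>
        by_cases hab : a = b
        · subst hab
          simp [pvPrefCount, ih as bs]
        · simp [pvPrefCount, hab]

theorem token_similar_py_spec' (token_a : String) (token_b : String) :
    token_similar_py token_a token_b = token_similar_py_alt token_a token_b := by
  unfold token_similar_py token_similar_py_alt
  cases hA : PySem.Str.isIn token_a token_b <;>
    cases hB : PySem.Str.isIn token_b token_a <;> simp
  rw [Bool.eq_iff_iff]
  rw [PySem.List.slice_to (xs := token_a.toList) (b := 3) (by norm_num),
      PySem.List.slice_to (xs := token_b.toList) (b := 3) (by norm_num)]
  simp only [pvPrefCount_ge_iff 3 token_a.toList token_b.toList, String.length_toList,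
    Bool.and_eq_true, beq_iff_eq, decide_eq_true_eq]
  tauto

-- ===== VERDICT (by name: the statement is the Claim_ definition above) =====
theorem token_similar_py_spec : Claim_equal_token_similar_py := by
  intro a b _
  exact token_similar_py_spec' a b
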